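-- pv_equiv track=rewrite | github.com/OrgPele/envctl | python/envctl_engine/startup/service_bootstrap_domain.py | _scrub_backend_sensitive_env
-- ===== SOURCE A (Python) =====
-- from typing import Any, Mapping, Protocol
--
-- _BACKEND_SENSITIVE_ENV_KEYS = (
--     "APP_ENV_FILE",
--     "DATABASE_URL",
--     "REDIS_URL",
--     "SQLALCHEMY_DATABASE_URL",
--     "ASYNC_DATABASE_URL",
--     "DB_HOST",
--     "DB_PORT",
--     "DB_USER",
--     "DB_PASSWORD",
--     "DB_NAME",
-- )
--
-- def _scrub_backend_sensitive_env(base_env: Mapping[str, str]) -> tuple[dict[str, str], tuple[str, ...]]: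
--     scrubbed: list[str] = []
--     merged: dict[str, str] = {}
--     for key, value in base_env.items():
--         if key in _BACKEND_SENSITIVE_ENV_KEYS and isinstance(value, str) and value.strip():
--             scrubbed.append(key)
--             continue
--         merged[str(key)] = str(value)
--     return merged, tuple(sorted(scrubbed))
-- ===== SOURCE B (Python) =====
-- _BACKEND_SENSITIVE_ENV_KEYS = (
--     "APP_ENV_FILE",
--     "DATABASE_URL",
--     "REDIS_URL",
--     "SQLALCHEMY_DATABASE_URL",
--     "ASYNC_DATABASE_URL",
--     "DB_HOST",
--     "DB_PORT",
--     "DB_USER",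
--     "DB_PASSWORD",
--     "DB_NAME",
-- )
--
-- def _scrub_backend_sensitive_env(base_env):
--     scrubbed = {k for k in _BACKEND_SENSITIVE_ENV_KEYS
--                 if isinstance(base_env.get(k), str) and base_env.get(k).strip()}
--     merged = {str(k): str(v) for k, v in base_env.items() if k not in scrubbed}
--     return merged, tuple(sorted(scrubbed))
-- ===== Notes on version B (the rewrite author's own statement) =====
-- stated objective: alternative
-- what changed: A's single skip-or-insert loop over the mapping's items is replaced by two differently-shaped passes: a set comprehension driven by the fixed sensitive-key tuple that indexes the mapping to decide which keys are scrubbed, then one filter comprehension over the items keeping keys outside that set.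
import Mathlib
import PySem

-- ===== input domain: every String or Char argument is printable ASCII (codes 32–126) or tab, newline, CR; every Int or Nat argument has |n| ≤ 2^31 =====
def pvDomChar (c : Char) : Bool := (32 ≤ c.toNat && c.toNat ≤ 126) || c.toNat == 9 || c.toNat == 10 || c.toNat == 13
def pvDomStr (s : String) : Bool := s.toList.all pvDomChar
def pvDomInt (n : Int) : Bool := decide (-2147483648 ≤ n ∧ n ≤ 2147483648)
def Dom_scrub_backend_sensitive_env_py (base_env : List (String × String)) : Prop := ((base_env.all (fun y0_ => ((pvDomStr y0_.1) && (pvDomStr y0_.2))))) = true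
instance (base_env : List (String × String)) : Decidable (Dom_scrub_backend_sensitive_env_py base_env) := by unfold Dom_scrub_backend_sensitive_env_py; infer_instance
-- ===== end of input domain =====

-- B replaces A's single skip-or-insert loop over the items by two differently-shaped passes: a set
-- comprehension driven by the fixed sensitive-key tuple (indexing the mapping), then one filter over
-- the items (objective: alternative decomposition; return value only, neither mutates its argument).

-- ===== PORT A =====
def pvSensitiveKeys : List String :=
  ["APP_ENV_FILE", "DATABASE_URL", "REDIS_URL", "SQLALCHEMY_DATABASE_URL",
   "ASYNC_DATABASE_URL", "DB_HOST", "DB_PORT", "DB_USER", "DB_PASSWORD", "DB_NAME"]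

-- A's per-item skip condition: 'key in _BACKEND_SENSITIVE_ENV_KEYS and isinstance(value, str) and value.strip()'
def pvCondA (kv : String × String) : Bool :=
  pvSensitiveKeys.contains kv.1 && (PySem.Str.strip kv.2 != "")

-- literal transliteration of A's loop: skip (and record) each sensitive non-blank entry, insert the rest
def scrub_backend_sensitive_env_py (base_env : List (String × String)) : (List (String × String)) × List String :=
  let st := base_env.foldl
    (fun (st : List String × PySem.Dict String String) kv =>
      if pvCondA kv then
        (st.1 ++ [kv.1], st.2)
      else
        (st.1, st.2.insert kv.1 kv.2))
    ([], PySem.Dict.empty)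
  (st.2.items, PySem.List.sorted st.1 (fun x => x) false)

-- ===== PORT B =====
-- B's comprehension condition: 'isinstance(base_env.get(k), str) and base_env.get(k).strip()'
def pvIsScrubbedKey (base_env : List (String × String)) (k : String) : Bool :=
  match base_env.lookup k with
  | some v => PySem.Str.strip v != ""
  | none => false

-- transliteration of B: set comprehension over the sensitive-key tuple, then one filter over the items
def scrub_backend_sensitive_env_py_alt (base_env : List (String × String)) : (List (String × String)) × List String :=
  let scrubbed : PySem.Set String :=
    PySem.Set.ofList (pvSensitiveKeys.filter (pvIsScrubbedKey base_env))
  let merged := base_env.filter (fun kv => !(PySem.Set.contains scrubbed kv.1))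
  (merged, PySem.List.sorted scrubbed (fun x => x) false)

-- ===== PRECONDITION & SPEC =====
-- Pre_ excludes association lists with duplicate keys: they cannot arise from A's Python
-- parameter, a Mapping[str, str], so the claim still covers the whole real input space.
def Pre_scrub_backend_sensitive_env_py (base_env : List (String × String)) : Prop :=
  (base_env.map Prod.fst).Nodup
instance (base_env : List (String × String)) : Decidable (Pre_scrub_backend_sensitive_env_py base_env) := by unfold Pre_scrub_backend_sensitive_env_py; infer_instance

def pvWitness_scrub_backend_sensitive_env_py : (List (String × String)) :=
  [("DB_PASSWORD", "secret"), ("PATH", "/bin"), ("DB_NAME", "  "), ("HOME", "/root")]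

def Spec_scrub_backend_sensitive_env_py (base_env : List (String × String)) (out : (List (String × String)) × List String) : Prop := out = scrub_backend_sensitive_env_py_alt base_env
instance (base_env : List (String × String)) (out : (List (String × String)) × List String) : Decidable (Spec_scrub_backend_sensitive_env_py base_env out) := by unfold Spec_scrub_backend_sensitive_env_py; infer_instance

-- ===== CLAIM (what is proved, stated in full; the proofs are below) =====
def Claim_equal_scrub_backend_sensitive_env_py : Prop := ∀ (base_env : List (String × String)), Dom_scrub_backend_sensitive_env_py base_env → Pre_scrub_backend_sensitive_env_py base_env → Spec_scrub_backend_sensitive_env_py base_env (scrub_backend_sensitive_env_py base_env)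

-- ===== LEMMAS AND PROOFS =====

-- first-match lookup on a duplicate-free association list finds the entry itself
lemma pvLookup_eq_some (l : List (String × String)) (kv : String × String)
    (h : (l.map Prod.fst).Nodup) (hm : kv ∈ l) : l.lookup kv.1 = some kv.2 := by
  induction l with
  | nil => cases hm
  | cons hd tl ih =>
      simp only [List.map_cons, List.nodup_cons] at h
      rcases List.mem_cons.1 hm with rfl | hm'
      · simp [List.lookup]
      · have hne : kv.1 ≠ hd.1 := fun he => h.1 (he ▸ List.mem_map_of_mem hm')
        simp [List.lookup, beq_eq_false_iff_ne.2 hne, ih h.2 hm']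

lemma pvMem_of_lookup (k v : String) (l : List (String × String))
    (h : l.lookup k = some v) : (k, v) ∈ l := by
  induction l with
  | nil => simp [List.lookup] at h
  | cons hd tl ih =>
      obtain ⟨k', v'⟩ := hd
      by_cases he : k = k'
      · simp [List.lookup, he] at h
        simp [he, h]
      · simp [List.lookup, beq_eq_false_iff_ne.2 he] at h
        exact List.mem_cons_of_mem _ (ih h)

-- A's fold, split into its two independent components
lemma pvFoldA_split (xs : List (String × String)) (s : List String)
    (d : PySem.Dict String String) :
    xs.foldl
      (fun (st : List String × PySem.Dict String String) kv =>
        if pvCondA kv then (st.1 ++ [kv.1], st.2)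
        else (st.1, st.2.insert kv.1 kv.2))
      (s, d)
    = (s ++ (xs.filter pvCondA).map Prod.fst,
       (xs.filter (fun kv => !pvCondA kv)).foldl
         (fun d kv => d.insert kv.1 kv.2) d) := by
  induction xs generalizing s d with
  | nil => simp
  | cons hd tl ih =>
      cases h : pvCondA hd <;> simp [List.foldl_cons, h, ih]

-- on an entry of a duplicate-free mapping, B's scrubbed-set test is exactly A's skip condition
lemma pvContains_eq_condA (base_env : List (String × String))
    (hpre : (base_env.map Prod.fst).Nodup) (kv : String × String) (hm : kv ∈ base_env) :
    decide (kv.1 ∈ pvSensitiveKeys.filter (pvIsScrubbedKey base_env)) = pvCondA kv := by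
  have hlk := pvLookup_eq_some base_env kv hpre hm
  by_cases hc : kv.1 ∈ pvSensitiveKeys
  · by_cases hs : PySem.Str.strip kv.2 = "" <;>
      simp [List.mem_filter, pvCondA, pvIsScrubbedKey, hlk, hc, hs]
  · simp [List.mem_filter, pvCondA, hc]

-- the two scrubbed-key lists are permutations of each other
lemma pvScrubbed_perm (base_env : List (String × String))
    (hpre : (base_env.map Prod.fst).Nodup) :
    ((base_env.filter pvCondA).map Prod.fst).Perm
      (pvSensitiveKeys.filter (pvIsScrubbedKey base_env)) := by
  have hnd1 : ((base_env.filter pvCondA).map Prod.fst).Nodup :=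
    hpre.sublist ((base_env.filter_sublist).map Prod.fst)
  have hndk : pvSensitiveKeys.Nodup := by decide
  have hnd2 : (pvSensitiveKeys.filter (pvIsScrubbedKey base_env)).Nodup := hndk.filter _
  refine (List.perm_ext_iff_of_nodup hnd1 hnd2).2 ?_
  intro k
  constructor
  · intro hk
    obtain ⟨kv, hkv, rfl⟩ := List.mem_map.1 hk
    have hkv' := List.mem_filter.1 hkv
    have hca := hkv'.2
    simp only [pvCondA, Bool.and_eq_true] at hca
    refine List.mem_filter.2 ⟨by simpa using hca.1, ?_⟩
    simp [pvIsScrubbedKey, pvLookup_eq_some base_env kv hpre hkv'.1, hca.2]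
  · intro hk
    have hk' := List.mem_filter.1 hk
    have hs := hk'.2
    unfold pvIsScrubbedKey at hs
    cases hlk : base_env.lookup k with
    | none => rw [hlk] at hs; simp at hs
    | some v =>
        rw [hlk] at hs
        have hmem : (k, v) ∈ base_env := pvMem_of_lookup k v base_env hlk
        refine List.mem_map.2 ⟨(k, v), List.mem_filter.2 ⟨hmem, ?_⟩, rfl⟩
        simp [pvCondA, hk'.1, hs]

-- sorting with the identity key is invariant under permutation of a duplicate-free list
lemma pvSorted_congr (l1 l2 : List String) (hperm : l1.Perm l2) (hnd : l2.Nodup) :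
    PySem.List.sorted l1 (fun x => x) false = PySem.List.sorted l2 (fun x => x) false := by
  have hp1 : (PySem.List.sorted l2 (fun x => x) false).Perm l1 :=
    (PySem.List.sorted_perm (xs := l2) (key := fun x => x) (rev := false)).trans hperm.symm
  have hpair : (PySem.List.sorted l2 (fun x => x) false).Pairwise (fun a b => a ≤ b) :=
    PySem.List.sorted_pairwise (xs := l2) (key := fun x => x)
  have hnds : (PySem.List.sorted l2 (fun x => x) false).Nodup :=
    ((PySem.List.sorted_perm (xs := l2) (key := fun x => x) (rev := false)).nodup_iff).2 hnd
  have hlt : (PySem.List.sorted l2 (fun x => x) false).Pairwise (fun a b => a < b) :=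
    (hpair.and hnds).imp (fun h => lt_of_le_of_ne h.1 h.2)
  exact PySem.List.sorted_eq_of_perm_of_pairwise_lt l1 _ (fun x => x) hp1 hlt

-- ===== VERDICT (by name: the statement is the Claim_ definition above) =====
theorem scrub_backend_sensitive_env_py_spec : Claim_equal_scrub_backend_sensitive_env_py := by
  intro base_env _hdom hpre
  unfold Spec_scrub_backend_sensitive_env_py
  unfold scrub_backend_sensitive_env_py scrub_backend_sensitive_env_py_alt
  rw [pvFoldA_split]
  dsimp only
  have hndk : pvSensitiveKeys.Nodup := by decide
  have hndf : (pvSensitiveKeys.filter (pvIsScrubbedKey base_env)).Nodup := hndk.filter _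
  have hofl : PySem.Set.ofList (pvSensitiveKeys.filter (pvIsScrubbedKey base_env))
      = pvSensitiveKeys.filter (pvIsScrubbedKey base_env) := by
    simp [pysem, hndf]
  have hfresh : ∀ a ∈ base_env.filter (fun kv => !pvCondA kv),
      (PySem.Dict.empty : PySem.Dict String String).contains a.1 = false := by
    intro a _; simp [pysem]
  have hndm : ((base_env.filter (fun kv => !pvCondA kv)).map Prod.fst).Nodup :=
    hpre.sublist ((base_env.filter_sublist).map Prod.fst)
  have hmerge := PySem.Dict.items_foldl_insert_fresh
    (base_env.filter (fun kv => !pvCondA kv)) Prod.fst Prod.snd PySem.Dict.empty hfresh hndm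
  have hfilter : base_env.filter (fun kv =>
        !(PySem.Set.contains (pvSensitiveKeys.filter (pvIsScrubbedKey base_env)) kv.1))
      = base_env.filter (fun kv => !pvCondA kv) := by
    refine List.filter_congr ?_
    intro kv hm
    have h1 : PySem.Set.contains (pvSensitiveKeys.filter (pvIsScrubbedKey base_env)) kv.1
        = decide (kv.1 ∈ pvSensitiveKeys.filter (pvIsScrubbedKey base_env)) := by
      simp [pysem]
    rw [h1, pvContains_eq_condA base_env hpre kv hm]
  have hscrub : PySem.List.sorted ((base_env.filter pvCondA).map Prod.fst) (fun x => x) false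
      = PySem.List.sorted (pvSensitiveKeys.filter (pvIsScrubbedKey base_env)) (fun x => x) false :=
    pvSorted_congr _ _ (pvScrubbed_perm base_env hpre) hndf
  rw [hofl, hfilter, hmerge, List.nil_append, hscrub]
  simp [PySem.Dict.empty]
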